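-- pv_equiv track=rewrite | github.com/microsoft/loop-invariant-gen-experiments | local_stuff/boogie_stuff/healing/healer.py | splice_invariants
-- ===== SOURCE A (Python) =====
-- def splice_invariants(code, invariants):
-- 		lines = code.splitlines()
-- 		while_loop_line_no = None
-- 		for index, line in enumerate(lines):
-- 				if "while" in line:
-- 						while_loop_line_no = index
-- 						break
-- 		if while_loop_line_no is None:
-- 				raise Exception("Could not find while loop")
-- 		output_lines = lines[:while_loop_line_no+1] + invariants + lines[while_loop_line_no+1:]
-- 		return '\n'.join(output_lines)
-- ===== SOURCE B (Python) =====
-- def splice_invariants(code, invariants):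
--     output = []
--     found = False
--     for line in code.splitlines():
--         output.append(line)
--         if not found and "while" in line:
--             output.extend(invariants)
--             found = True
--     if not found:
--         raise Exception("Could not find while loop")
--     return '\n'.join(output)
-- ===== Notes on version B (the rewrite author's own statement) =====
-- stated objective: alternative
-- what changed: Replaces A's locate-index-then-slice-and-concatenate scheme with a single streaming pass that appends each line and splices the invariants in place at the first while-line, guarded by a found flag.
import Mathlib
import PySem

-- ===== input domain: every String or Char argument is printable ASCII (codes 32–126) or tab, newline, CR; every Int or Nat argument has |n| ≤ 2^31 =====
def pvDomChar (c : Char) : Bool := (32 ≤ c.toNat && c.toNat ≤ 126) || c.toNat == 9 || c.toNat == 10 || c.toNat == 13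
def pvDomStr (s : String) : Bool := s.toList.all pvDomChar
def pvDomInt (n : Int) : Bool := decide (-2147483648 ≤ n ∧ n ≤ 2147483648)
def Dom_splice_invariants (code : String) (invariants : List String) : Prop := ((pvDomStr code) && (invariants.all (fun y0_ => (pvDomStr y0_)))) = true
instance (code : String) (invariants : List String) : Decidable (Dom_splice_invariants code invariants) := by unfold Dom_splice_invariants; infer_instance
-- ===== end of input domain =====

-- B replaces A's locate-index-then-slice scheme with a single streaming pass guarded by a found flag (alternative decomposition, same cost).


-- ===== PORT A =====
-- A's enumerate-and-break search for the first line containing "while" (index carried like Python's enumerate)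
def spliceFindA (lines : List String) (index : Nat) : Option Nat :=
  match lines with
  | [] => none
  | line :: rest =>
      if PySem.Str.isIn "while" line then some index else spliceFindA rest (index + 1)

def splice_invariants (code : String) (invariants : List String) : String :=
  match spliceFindA (PySem.Str.splitlines code) 0 with
  | none => ""   -- Python raises Exception("Could not find while loop"); excluded by Pre_
  | some i =>
      PySem.Str.join "\n"
        (PySem.List.slice (PySem.Str.splitlines code) none (some ((i + 1 : Nat) : Int)) ++ invariants ++
         PySem.List.slice (PySem.Str.splitlines code) (some ((i + 1 : Nat) : Int)) none)

-- ===== PORT B =====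
-- B's single streaming pass: append each line; at the first while-line also splice the invariants, then set found
def spliceLoopB (invariants : List String) (lines : List String) (found : Bool)
    (output : List String) : List String × Bool :=
  match lines with
  | [] => (output, found)
  | line :: rest =>
      if !found && PySem.Str.isIn "while" line then
        spliceLoopB invariants rest true ((output ++ [line]) ++ invariants)
      else
        spliceLoopB invariants rest found (output ++ [line])

def splice_invariants_alt (code : String) (invariants : List String) : String :=
  if !(spliceLoopB invariants (PySem.Str.splitlines code) false []).2 then
    ""   -- Python raises Exception("Could not find while loop"); excluded by Pre_
  else
    PySem.Str.join "\n" (spliceLoopB invariants (PySem.Str.splitlines code) false []).1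

-- ===== PRECONDITION & SPEC =====
-- Pre_ excludes exactly the inputs where no line of code contains "while": there both A and B raise Exception("Could not find while loop").
def Pre_splice_invariants (code : String) (invariants : List String) : Prop :=
  (PySem.Str.splitlines code).any (fun l => PySem.Str.isIn "while" l) = true
instance (code : String) (invariants : List String) : Decidable (Pre_splice_invariants code invariants) := by
  unfold Pre_splice_invariants; infer_instance

def pvWitness_splice_invariants : String × List String := ("x = 0\nwhile x:\n  y", ["invariant x;"])

def Spec_splice_invariants (code : String) (invariants : List String) (out : String) : Prop := out = splice_invariants_alt code invariants
instance (code : String) (invariants : List String) (out : String) : Decidable (Spec_splice_invariants code invariants out) := by unfold Spec_splice_invariants; infer_instance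

-- ===== CLAIM (what is proved, stated in full; the proofs are below) =====
def Claim_equal_splice_invariants : Prop := ∀ (code : String) (invariants : List String), Dom_splice_invariants code invariants → Pre_splice_invariants code invariants → Spec_splice_invariants code invariants (splice_invariants code invariants)

-- ===== LEMMAS AND PROOFS =====

-- shifting the enumerate index only shifts the answer
theorem spliceFindA_shift (lines : List String) (i : Nat) :
    spliceFindA lines i = (spliceFindA lines 0).map (· + i) := by
  induction lines generalizing i with
  | nil => simp [spliceFindA]
  | cons l rest ih =>
      simp only [spliceFindA]
      split_ifs with hc
      · simp
      · rw [ih (i + 1), ih 1]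
        cases spliceFindA rest 0 <;> simp <;> try omega

-- once found, the streaming loop just appends the remaining lines
theorem spliceLoopB_found (inv : List String) (lines out : List String) :
    spliceLoopB inv lines true out = (out ++ lines, true) := by
  induction lines generalizing out with
  | nil => simp [spliceLoopB]
  | cons l rest ih => simp [spliceLoopB, ih]

-- the streaming loop computes exactly A's take/splice/drop (or the identity when no while-line exists)
theorem spliceLoopB_eq (inv : List String) (lines out : List String) :
    spliceLoopB inv lines false out =
      match spliceFindA lines 0 with
      | none => (out ++ lines, false)
      | some i => (out ++ lines.take (i + 1) ++ inv ++ lines.drop (i + 1), true) := by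
  induction lines generalizing out with
  | nil => simp [spliceLoopB, spliceFindA]
  | cons l rest ih =>
      simp only [spliceLoopB, spliceFindA, Bool.not_false, Bool.true_and]
      split_ifs with hc
      · rw [spliceLoopB_found]
        simp
      · rw [ih (out ++ [l]), spliceFindA_shift rest 1]
        cases hh : spliceFindA rest 0 with
        | none => simp
        | some j => simp [List.take_succ_cons, List.drop_succ_cons]

-- ===== VERDICT (by name: the statement is the Claim_ definition above) =====
theorem splice_invariants_spec : Claim_equal_splice_invariants := by
  intro code invariants _ _
  simp only [Spec_splice_invariants, splice_invariants, splice_invariants_alt]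
  rw [spliceLoopB_eq]
  cases h : spliceFindA (PySem.Str.splitlines code) 0 with
  | none => simp
  | some i =>
      simp only []   -- iota-reduce the match on `some i`
      rw [PySem.List.slice_to_natCast, PySem.List.slice_from_natCast]
      simp
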